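-- pv_equiv track=rewrite | github.com/xc01/sts2-simulator | sts2_map_simulator.py | deterministic_hash_code
-- ===== SOURCE A (Python) =====
-- def deterministic_hash_code(s: str) -> int:
--     num = 352654597
--     num2 = num
--     for i in range(0, len(s), 2):
--         num = ((num << 5) + num) ^ ord(s[i])
--         num &= 0xFFFFFFFF
--         if i == len(s) - 1:
--             break
--         num2 = ((num2 << 5) + num2) ^ ord(s[i + 1])
--         num2 &= 0xFFFFFFFF
--     result = (num + num2 * 1566083941) & 0xFFFFFFFF
--     # convert to signed 32-bit int like C#
--     if result >= 0x80000000: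
--         result -= 0x100000000
--     return result
-- ===== SOURCE B (Python) =====
-- def deterministic_hash_code(s: str) -> int:
--     num = 352654597
--     num2 = 352654597
--     for c in s[0::2]:
--         num = (((num << 5) + num) ^ ord(c)) & 0xFFFFFFFF
--     for c in s[1::2]:
--         num2 = (((num2 << 5) + num2) ^ ord(c)) & 0xFFFFFFFF
--     result = (num + num2 * 1566083941) & 0xFFFFFFFF
--     return result - 0x100000000 if result >= 0x80000000 else result
-- ===== Notes on version B (the rewrite author's own statement) =====
-- stated objective: simpler
-- what changed: Replaces A's single interleaved index loop over range(0,len,2) with its in-range s[i]/s[i+1] accesses and break on the last odd index by two independent straight character loops over the even- and odd-indexed slices s[0::2] and s[1::2], removing all index and break logic.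
import Mathlib
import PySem

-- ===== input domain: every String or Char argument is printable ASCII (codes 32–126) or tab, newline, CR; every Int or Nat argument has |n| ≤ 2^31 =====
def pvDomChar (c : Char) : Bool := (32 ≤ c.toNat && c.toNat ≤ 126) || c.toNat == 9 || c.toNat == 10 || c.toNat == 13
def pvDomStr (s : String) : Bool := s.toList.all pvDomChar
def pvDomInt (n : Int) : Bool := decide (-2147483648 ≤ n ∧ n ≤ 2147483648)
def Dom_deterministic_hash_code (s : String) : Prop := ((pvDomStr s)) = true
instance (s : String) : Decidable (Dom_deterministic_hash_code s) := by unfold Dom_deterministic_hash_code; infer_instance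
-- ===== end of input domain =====

-- B replaces A's single interleaved index loop (with its break on the last odd position) by two
-- independent character loops over the even- and odd-indexed slices (objective: simpler).
-- All intermediate Python ints are nonnegative here, so Nat bit-operations are exact.

-- ===== PORT A =====
-- the loop over range(0, len(s), 2); s[i] and s[i+1] are always in range (i+1 is guarded by
-- the break), so pyGetD's default ' ' is only a totality guard and is never returned
def hcLoopA (cs : List Char) (len : Int) : List Int → Nat × Nat → Nat × Nat
  | [], st => st
  | i :: rest, (num, num2) =>
    let num := (((num <<< 5) + num) ^^^ (PySem.List.pyGetD cs i ' ').toNat) &&& 0xFFFFFFFF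
    if i = len - 1 then (num, num2)
    else
      let num2 := (((num2 <<< 5) + num2) ^^^ (PySem.List.pyGetD cs (i + 1) ' ').toNat) &&& 0xFFFFFFFF
      hcLoopA cs len rest (num, num2)

def deterministic_hash_code (s : String) : Int :=
  let cs := s.toList
  let st := hcLoopA cs cs.length (PySem.List.pyRange 0 cs.length 2) (352654597, 352654597)
  let result := (st.1 + st.2 * 1566083941) &&& 0xFFFFFFFF
  if result ≥ 0x80000000 then (result : Int) - 0x100000000 else (result : Int)

-- ===== PORT B =====
-- the shared loop body of Source B's two for-loops
def hcFold (num : Nat) (c : Char) : Nat :=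
  (((num <<< 5) + num) ^^^ c.toNat) &&& 0xFFFFFFFF

def deterministic_hash_code_alt (s : String) : Int :=
  let cs := s.toList
  let num := ((PySem.List.slice? cs (some 0) none 2).getD []).foldl hcFold 352654597
  let num2 := ((PySem.List.slice? cs (some 1) none 2).getD []).foldl hcFold 352654597
  let result := (num + num2 * 1566083941) &&& 0xFFFFFFFF
  if result ≥ 0x80000000 then (result : Int) - 0x100000000 else (result : Int)

-- ===== PRECONDITION & SPEC =====
def Spec_deterministic_hash_code (s : String) (out : Int) : Prop := out = deterministic_hash_code_alt s
instance (s : String) (out : Int) : Decidable (Spec_deterministic_hash_code s out) := by unfold Spec_deterministic_hash_code; infer_instance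

-- ===== CLAIM (what is proved, stated in full; the proofs are below) =====
def Claim_equal_deterministic_hash_code : Prop := ∀ (s : String), Dom_deterministic_hash_code s → Spec_deterministic_hash_code s (deterministic_hash_code s)

-- ===== LEMMAS AND PROOFS =====

-- the even-indexed subsequence of a list, and the odd-indexed one
def evens {α : Type} : List α → List α
  | [] => []
  | [x] => [x]
  | x :: _ :: t => x :: evens t

def odds {α : Type} (xs : List α) : List α := evens (xs.drop 1)

theorem evens_cons {α : Type} (x : α) (t : List α) : evens (x :: t) = x :: odds t := by
  cases t <;> rfl

theorem odds_cons {α : Type} (x : α) (t : List α) : odds (x :: t) = evens t := rfl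

theorem strided {α : Type} (xs : List α) :
    (List.range ((xs.length + 1) / 2)).filterMap (fun k => xs[2 * k]?) = evens xs ∧
    (List.range (xs.length / 2)).filterMap (fun k => xs[2 * k + 1]?) = odds xs := by
  induction xs with
  | nil => simp [evens, odds]
  | cons x t ih =>
    constructor
    · have hn : (t.length + 1 + 1) / 2 = t.length / 2 + 1 := by omega
      rw [List.length_cons, hn, List.range_succ_eq_map, List.filterMap_cons,
        List.filterMap_map, evens_cons, ← ih.2]
      simp [Function.comp, Nat.mul_succ, Nat.succ_eq_add_one]
    · rw [List.length_cons, odds_cons, ← ih.1]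
      apply List.filterMap_congr
      intro k _
      rw [List.getElem?_cons_succ]

theorem slice2_evens {α : Type} (xs : List α) :
    PySem.List.slice? xs (some 0) none 2 = some (evens xs) := by
  rw [← (strided xs).1]
  simp only [PySem.List.slice?, PySem.List.sliceIndices]
  norm_num
  have hc : (if 0 < xs.length then (((xs.length:Int) + 2 - 1) / 2).toNat else 0)
      = (xs.length + 1) / 2 := by split <;> omega
  rw [hc]
  apply List.filterMap_congr
  intro k _
  have h2 : ((2:Int) * (k:Int)).toNat = 2 * k := by omega
  rw [h2]

theorem slice2_odds {α : Type} (xs : List α) :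
    PySem.List.slice? xs (some 1) none 2 = some (odds xs) := by
  rw [← (strided xs).2]
  simp only [PySem.List.slice?, PySem.List.sliceIndices]
  norm_num
  have hmin : min (1:Int) (xs.length:Int) = if xs.length = 0 then 0 else 1 := by
    split <;> omega
  rcases Nat.eq_zero_or_pos xs.length with h0 | h0
  · rw [hmin, if_pos h0]
    simp [h0]
  · rw [hmin, if_neg (by omega)]
    have hc : (if 1 < xs.length then (((xs.length:Int) - 1 + 2 - 1) / 2).toNat else 0)
        = xs.length / 2 := by split <;> omega
    rw [hc]
    apply List.filterMap_congr
    intro k _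
    have h2 : ((1:Int) + 2 * (k:Int)).toNat = 2 * k + 1 := by omega
    rw [h2]

theorem pyRange_two_cons (a b : Int) (h : a < b) :
    PySem.List.pyRange a b 2 = a :: PySem.List.pyRange (a + 2) b 2 := by
  rw [PySem.List.pyRange_of_pos a b (by norm_num),
    PySem.List.pyRange_of_pos (a + 2) b (by norm_num)]
  by_cases h2 : a + 2 < b
  · have hn : (if a < b then ((b - a + 2 - 1) / 2).toNat else 0)
        = (if a + 2 < b then ((b - (a + 2) + 2 - 1) / 2).toNat else 0) + 1 := by
      simp only [if_pos h, if_pos h2]; omega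
    rw [hn, List.range_succ_eq_map, List.map_cons, List.map_map]
    simp only [Nat.cast_zero, mul_zero, add_zero]
    congr 1
    apply List.map_congr_left
    intro k _
    simp [Function.comp, Nat.succ_eq_add_one]
    ring
  · have hn : (if a < b then ((b - a + 2 - 1) / 2).toNat else 0) = 1 := by
      simp only [if_pos h]; omega
    have hn2 : (if a + 2 < b then ((b - (a + 2) + 2 - 1) / 2).toNat else 0) = 0 := by
      simp only [if_neg h2]
    rw [hn, hn2]
    simp

theorem loopA_eq (cs : List Char) :
    ∀ (m k : Nat) (st : Nat × Nat), cs.length = k + m →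
      hcLoopA cs cs.length (PySem.List.pyRange k cs.length 2) st
        = ((evens (cs.drop k)).foldl hcFold st.1, (odds (cs.drop k)).foldl hcFold st.2) := by
  intro m
  induction m using Nat.strong_induction_on with
  | _ m ih =>
    intro k st h
    obtain ⟨n1, n2⟩ := st
    match m with
    | 0 =>
      have hd : cs.drop k = [] := List.drop_of_length_le (by omega)
      rw [PySem.List.pyRange_of_pos _ _ (by norm_num : (0:Int) < 2)]
      have hnlt : ¬ ((k:Int) < (cs.length:Int)) := by omega
      simp [hcLoopA, hd, hnlt, odds, evens]
    | 1 =>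
      have hk : k < cs.length := by omega
      rw [pyRange_two_cons _ _ (by exact_mod_cast hk)]
      rw [PySem.List.pyRange_of_pos _ _ (by norm_num : (0:Int) < 2)]
      have : ¬ ((k:Int) + 2 < (cs.length:Int)) := by omega
      rw [if_neg this]
      have hcond : (k:Int) = (cs.length:Int) - 1 := by omega
      simp only [hcLoopA, List.range_zero, List.map_nil, if_pos hcond]
      rw [List.drop_eq_getElem_cons hk]
      have : cs.drop (k + 1) = [] := List.drop_of_length_le (by omega)
      rw [this, evens_cons, odds_cons]
      simp [evens, odds, PySem.List.pyGetD_natCast, List.getD_eq_getElem?_getD,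
        List.getElem?_eq_getElem hk, hcFold]
    | m + 2 =>
      have hk : k < cs.length := by omega
      have hk1 : k + 1 < cs.length := by omega
      rw [pyRange_two_cons _ _ (by exact_mod_cast hk)]
      have hcond : ¬ ((k:Int) = (cs.length:Int) - 1) := by omega
      simp only [hcLoopA, if_neg hcond]
      have hcast : ((k:Int) + 1) = ((k + 1 : Nat) : Int) := by push_cast; ring
      rw [hcast]
      have hrec := ih m (by omega) (k + 2)
        ((((n1 <<< 5) + n1) ^^^ (PySem.List.pyGetD cs (k:Int) ' ').toNat) &&& 0xFFFFFFFF,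
         (((n2 <<< 5) + n2) ^^^ (PySem.List.pyGetD cs ((k + 1 : Nat):Int) ' ').toNat) &&& 0xFFFFFFFF)
        (by omega)
      have hcast2 : ((k:Int) + 2) = ((k + 2 : Nat) : Int) := by push_cast; ring
      rw [hcast2, hrec]
      have e1 : cs.drop k = cs[k] :: cs[k + 1] :: cs.drop (k + 2) := by
        rw [List.drop_eq_getElem_cons hk, List.drop_eq_getElem_cons hk1]
      have h2 : evens (cs.drop k) = cs[k] :: evens (cs.drop (k + 2)) := by
        rw [e1, evens_cons, odds_cons]
      have h3 : odds (cs.drop k) = cs[k + 1] :: odds (cs.drop (k + 2)) := by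
        rw [e1, odds_cons, evens_cons]
      have hg : PySem.List.pyGetD cs ((k:Int) + 1) ' ' = cs[k + 1] := by
        rw [hcast, PySem.List.pyGetD_natCast]
        simp [List.getD_eq_getElem?_getD, List.getElem?_eq_getElem hk1]
      rw [h2, h3]
      simp [hcFold, hg, PySem.List.pyGetD_natCast, List.getD_eq_getElem?_getD,
        List.getElem?_eq_getElem hk]

-- ===== VERDICT (by name: the statement is the Claim_ definition above) =====
theorem deterministic_hash_code_spec : Claim_equal_deterministic_hash_code := by
  intro s _
  have h := loopA_eq s.toList s.toList.length 0 (352654597, 352654597) (by omega)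
  simp only [Nat.cast_zero, List.drop_zero] at h
  unfold Spec_deterministic_hash_code deterministic_hash_code deterministic_hash_code_alt
  simp only [slice2_evens, slice2_odds, Option.getD_some, h]
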